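-- pv_equiv track=rewrite | github.com/PaulaLindo/FinancialReportingSystem | fix_ui_parity_complete.py | process_variables
-- ===== SOURCE A (Python) =====
-- def process_variables(content):
--     """Process Flask variables"""
--
--     # Mock data
--     mock_data = {
--         'current_user.full_name': 'Sarah Nkosi',
--         'current_user.role': 'CFO',
--         'get_role_description(current_user.role)': 'Chief Financial Officer',
--         'current_user.role.lower()': 'cfo'
--     }
--
--     # Replace variables
--     for var, value in mock_data.items():
--         content = content.replace('{{ ' + var + ' }}', value)
--         content = content.replace('{{' + var + '}}', value)
--
--     return content
-- ===== SOURCE B (Python) =====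
-- def process_variables(content):
--     """Process Flask variables"""
--
--     # Mock data
--     mock_data = {
--         'current_user.full_name': 'Sarah Nkosi',
--         'current_user.role': 'CFO',
--         'get_role_description(current_user.role)': 'Chief Financial Officer',
--         'current_user.role.lower()': 'cfo',
--     }
--
--     # Token table: both the spaced and the unspaced form of each variable
--     mapping = {}
--     for var, value in mock_data.items():
--         mapping['{{ ' + var + ' }}'] = value
--         mapping['{{' + var + '}}'] = value
--
--     # One left-to-right pass: at each position emit either a token's mock
--     # value (skipping the token) or the character itself
--     out = []
--     i = 0
--     n = len(content)
--     while i < n: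
--         for tok, val in mapping.items():
--             if content.startswith(tok, i):
--                 out.append(val)
--                 i += len(tok)
--                 break
--         else:
--             out.append(content[i])
--             i += 1
--     return ''.join(out)
-- ===== Notes on version B (the rewrite author's own statement) =====
-- stated objective: alternative
-- what changed: Replaces A's eight sequential full-string .replace passes by a single left-to-right scan that consults a table of the eight literal tokens (spaced and unspaced forms) and emits the mock value at each match; equivalence rests on the tokens being mutually non-overlapping and the values containing no braces.
import Mathlib
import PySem

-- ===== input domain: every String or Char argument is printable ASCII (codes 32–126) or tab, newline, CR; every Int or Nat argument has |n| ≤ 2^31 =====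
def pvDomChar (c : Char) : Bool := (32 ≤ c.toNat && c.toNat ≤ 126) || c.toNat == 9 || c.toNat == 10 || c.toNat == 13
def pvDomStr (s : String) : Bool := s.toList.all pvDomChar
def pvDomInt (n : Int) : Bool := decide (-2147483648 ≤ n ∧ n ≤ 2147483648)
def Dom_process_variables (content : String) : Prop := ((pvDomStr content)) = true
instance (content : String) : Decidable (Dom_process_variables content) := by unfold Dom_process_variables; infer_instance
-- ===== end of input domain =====

-- B replaces A's eight sequential full-string .replace passes by one left-to-right scan
-- consulting a table of the eight literal tokens (alternative decomposition, not claimed faster).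

-- ===== PORT A =====
def process_variables (content : String) : String :=
  let mock_data : PySem.Dict String String := PySem.Dict.ofList
    [("current_user.full_name", "Sarah Nkosi"),
     ("current_user.role", "CFO"),
     ("get_role_description(current_user.role)", "Chief Financial Officer"),
     ("current_user.role.lower()", "cfo")]
  mock_data.items.foldl (fun content vv =>
    PySem.Str.replace (PySem.Str.replace content ("{{ " ++ vv.1 ++ " }}") vv.2)
      ("{{" ++ vv.1 ++ "}}") vv.2) content

-- ===== PORT B =====
-- Source B's inner `for tok, val in mapping.items(): if content.startswith(tok, i)` probe
def pvFindTok : List (List Char × List Char) → List Char → Option (List Char × List Char)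
  | [], _ => none
  | (t, v) :: rest, s => if t.isPrefixOf s then some (t, v) else pvFindTok rest s

-- Source B's `while i < n` scan: at each position emit a token's value (skipping the token)
-- or the character itself; exact hand port of that loop (all tokens are literal strings)
def pvSubAll (tbl : List (List Char × List Char)) : List Char → List Char
  | [] => []
  | c :: s =>
    match pvFindTok tbl (c :: s) with
    | some (t, v) => v ++ pvSubAll tbl (s.drop (t.length - 1))
    | none => c :: pvSubAll tbl s
termination_by l => l.length
decreasing_by
  · simp only [List.length_drop, List.length_cons]; omega
  · simp

def process_variables_alt (content : String) : String :=
  let mock_data : PySem.Dict String String := PySem.Dict.ofList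
    [("current_user.full_name", "Sarah Nkosi"),
     ("current_user.role", "CFO"),
     ("get_role_description(current_user.role)", "Chief Financial Officer"),
     ("current_user.role.lower()", "cfo")]
  let mapping : PySem.Dict String String := mock_data.items.foldl
    (fun m vv => (m.insert ("{{ " ++ vv.1 ++ " }}") vv.2).insert ("{{" ++ vv.1 ++ "}}") vv.2)
    PySem.Dict.empty
  String.ofList (pvSubAll (mapping.items.map fun kv => (kv.1.toList, kv.2.toList)) content.toList)

-- ===== PRECONDITION & SPEC =====
def Spec_process_variables (content : String) (out : String) : Prop := out = process_variables_alt content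
instance (content : String) (out : String) : Decidable (Spec_process_variables content out) := by unfold Spec_process_variables; infer_instance

-- ===== CLAIM (what is proved, stated in full; the proofs are below) =====
def Claim_equal_process_variables : Prop := ∀ (content : String), Dom_process_variables content → Spec_process_variables content (process_variables content)

-- ===== LEMMAS AND PROOFS =====

-- the concrete 8-entry token table (spaced and unspaced form of each variable)
def pvTbl : List (List Char × List Char) :=
  [("{{ current_user.full_name }}".toList, "Sarah Nkosi".toList),
   ("{{current_user.full_name}}".toList, "Sarah Nkosi".toList),
   ("{{ current_user.role }}".toList, "CFO".toList),
   ("{{current_user.role}}".toList, "CFO".toList),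
   ("{{ get_role_description(current_user.role) }}".toList, "Chief Financial Officer".toList),
   ("{{get_role_description(current_user.role)}}".toList, "Chief Financial Officer".toList),
   ("{{ current_user.role.lower() }}".toList, "cfo".toList),
   ("{{current_user.role.lower()}}".toList, "cfo".toList)]

-- A's eight sequential replace passes, as a fold of single-token scans
def pvApplyAll (tbl : List (List Char × List Char)) (l : List Char) : List Char :=
  tbl.foldl (fun l p => pvSubAll [p] l) l

-- non-interference conditions on a token table: tokens nonempty and '}'-terminated,
-- values brace-free and not infix of any token, tokens never overlap one another or a value
def pvOK (tbl : List (List Char × List Char)) : Prop :=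
  (∀ p ∈ tbl, p.1 ≠ [] ∧ p.1.getLast? = some '}') ∧
  (∀ p ∈ tbl, '}' ∉ p.2) ∧
  (∀ p ∈ tbl, ∀ q ∈ tbl, ¬ p.2 <:+: q.1) ∧
  (∀ p ∈ tbl, ∀ q ∈ tbl, p.1 ≠ q.1 → ∀ j < q.1.length, ¬ p.1 <+: q.1.drop j ∧ ¬ q.1.drop j <+: p.1) ∧
  (∀ p ∈ tbl, ∀ q ∈ tbl, ∀ j < q.2.length, ¬ p.1 <+: q.2.drop j ∧ ¬ q.2.drop j <+: p.1) ∧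
  (∀ p ∈ tbl, ∀ q ∈ tbl, p.1 = q.1 → p.2 = q.2)

theorem pvOK_pvTbl : pvOK pvTbl := by unfold pvOK; decide

theorem pvFindTok_none_iff (tbl : List (List Char × List Char)) (s : List Char) :
    pvFindTok tbl s = none ↔ ∀ p ∈ tbl, ¬ p.1 <+: s := by
  induction tbl with
  | nil => simp [pvFindTok]
  | cons p tl ih =>
    obtain ⟨t, v⟩ := p
    simp only [pvFindTok]
    split
    · rename_i h
      simp only [List.isPrefixOf_iff_prefix] at h
      constructor
      · intro hc; simp at hc
      · intro hall; exact absurd h (hall (t, v) (by simp))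
    · rename_i h
      simp only [List.isPrefixOf_iff_prefix] at h
      rw [ih]
      constructor
      · intro hall p hp
        rcases List.mem_cons.mp hp with hp | hp
        · subst hp; exact h
        · exact hall p hp
      · intro hall p hp; exact hall p (List.mem_cons_of_mem _ hp)

theorem pvFindTok_eq_some (tbl : List (List Char × List Char)) (s t v : List Char)
    (h : pvFindTok tbl s = some (t, v)) : (t, v) ∈ tbl ∧ t <+: s := by
  induction tbl with
  | nil => simp [pvFindTok] at h
  | cons p tl ih =>
    obtain ⟨t', v'⟩ := p
    simp only [pvFindTok] at h
    split at h
    · rename_i hpre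
      simp only [Option.some.injEq, Prod.mk.injEq] at h
      obtain ⟨h1, h2⟩ := h; subst h1; subst h2
      exact ⟨by simp, List.isPrefixOf_iff_prefix.mp hpre⟩
    · obtain ⟨hm, hp⟩ := ih h
      exact ⟨List.mem_cons_of_mem _ hm, hp⟩

theorem pvSubAll_cons_none (tbl : List (List Char × List Char)) (c : Char) (s : List Char)
    (h : pvFindTok tbl (c :: s) = none) : pvSubAll tbl (c :: s) = c :: pvSubAll tbl s := by
  rw [pvSubAll, h]

theorem pvSubAll_prefix (tbl : List (List Char × List Char)) (l t v : List Char)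
    (h : pvFindTok tbl l = some (t, v)) (ht : t ≠ []) (hl : l ≠ []) :
    pvSubAll tbl l = v ++ pvSubAll tbl (l.drop t.length) := by
  obtain ⟨c, s, rfl⟩ := List.exists_cons_of_ne_nil hl
  rw [pvSubAll, h]
  obtain ⟨n, hn⟩ : ∃ n, t.length = n + 1 :=
    ⟨t.length - 1, by have := List.length_pos_iff.mpr ht; omega⟩
  simp [hn]

theorem pvGoEq (old new : List Char) (h : old ≠ []) :
    ∀ fuel l acc, l.length ≤ fuel →
      PySem.Chars.replace.go old new fuel l acc = acc.reverse ++ pvSubAll [(old, new)] l := by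
  intro fuel
  induction fuel with
  | zero =>
    intro l acc hl
    have : l = [] := List.eq_nil_of_length_eq_zero (by omega)
    subst this
    rw [PySem.Chars.replace.go]
    simp [pvSubAll]
  | succ n ih =>
    intro l acc hl
    match l with
    | [] =>
      rw [PySem.Chars.replace.go]
      simp [pvSubAll]
      all_goals omega
    | c :: t =>
      rw [PySem.Chars.replace.go]
      have hol : 1 ≤ old.length := List.length_pos_iff.mpr h
      split
      · rename_i hpre
        rw [ih (List.drop old.length (c :: t)) (new.reverse ++ acc)
          (by simp only [List.length_drop, List.length_cons] at *; omega)]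
        rw [pvSubAll]
        simp only [pvFindTok, hpre, if_pos]
        have : List.drop old.length (c :: t) = List.drop (old.length - 1) t := by
          obtain ⟨m, hm⟩ : ∃ m, old.length = m + 1 := ⟨old.length - 1, by omega⟩
          simp [hm]
        rw [this]
        simp
      · rename_i hpre
        rw [ih t (c :: acc) (by simp at hl ⊢; omega)]
        rw [pvSubAll]
        simp only [pvFindTok, hpre]
        simp

theorem pvReplace_eq_subAll (s old new : List Char) (h : old ≠ []) :
    PySem.Chars.replace s old new = pvSubAll [(old, new)] s := by
  rw [PySem.Chars.replace]
  rw [if_neg (by simp [h])]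
  simpa using pvGoEq old new h s.length s [] le_rfl

theorem pvNoPrefixAppend (t p rest : List Char) (h1 : ¬ t <+: p) (h2 : ¬ p <+: t) :
    ¬ t <+: p ++ rest := by
  intro h
  rcases Nat.le_total t.length p.length with hle | hle
  · exact h1 (List.prefix_of_prefix_length_le h (List.prefix_append p rest) hle)
  · exact h2 (List.prefix_of_prefix_length_le (List.prefix_append p rest) h hle)

theorem pvSkipSingle (t v : List Char) :
    ∀ p, (∀ j < p.length, ¬ t <+: p.drop j ∧ ¬ p.drop j <+: t) →
      ∀ rest, pvSubAll [(t, v)] (p ++ rest) = p ++ pvSubAll [(t, v)] rest := by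
  intro p
  induction p with
  | nil => intro _ rest; simp
  | cons c p' ih =>
    intro hp rest
    have h0 := hp 0 (by simp)
    simp only [List.drop_zero] at h0
    have hnp : ¬ t <+: c :: (p' ++ rest) := by
      have := pvNoPrefixAppend t (c :: p') rest h0.1 h0.2
      simpa using this
    have hft : pvFindTok [(t, v)] (c :: (p' ++ rest)) = none := by
      simp [pvFindTok, List.isPrefixOf_iff_prefix, hnp]
    calc pvSubAll [(t, v)] ((c :: p') ++ rest)
        = c :: pvSubAll [(t, v)] (p' ++ rest) := by
          rw [List.cons_append, pvSubAll, hft]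
      _ = c :: (p' ++ pvSubAll [(t, v)] rest) := by
          rw [ih (fun j hj => hp (j + 1) (by simp at hj ⊢; omega)) rest]
      _ = (c :: p') ++ pvSubAll [(t, v)] rest := rfl

theorem pvPresSingle (t v : List Char) (hv : '}' ∉ v) :
    ∀ s u : List Char, ¬ v <:+: u → (u = [] ∨ u.getLast? = some '}') →
      u <+: pvSubAll [(t, v)] s → u <+: s := by
  suffices h : ∀ n, ∀ s : List Char, s.length ≤ n → ∀ u : List Char,
      ¬ v <:+: u → (u = [] ∨ u.getLast? = some '}') →
      u <+: pvSubAll [(t, v)] s → u <+: s by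
    intro s; exact h s.length s le_rfl
  intro n
  induction n with
  | zero =>
    intro s hs u _ _ hu
    have : s = [] := List.eq_nil_of_length_eq_zero (by omega)
    subst this
    simpa [pvSubAll] using hu
  | succ n ihn =>
  intro s hs
  match s with
  | [] =>
    intro u _ _ hu
    simpa [pvSubAll] using hu
  | c :: s' =>
    intro u hvu hlast hu
    rcases eq_or_ne u [] with rfl | hune
    · exact List.nil_prefix
    cases hft : pvFindTok [(t, v)] (c :: s') with
    | some tv =>
      have htv : tv = (t, v) := by
        simp only [pvFindTok] at hft
        split at hft
        · simpa using hft.symm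
        · simp at hft
      subst htv
      rw [pvSubAll, hft] at hu
      exfalso
      rcases Nat.le_total u.length v.length with hle | hle
      · have hup : u <+: v :=
          List.prefix_of_prefix_length_le hu (List.prefix_append v _) hle
        have hlu : u.getLast? = some '}' := hlast.resolve_left hune
        exact hv (hup.subset (List.mem_of_getLast? hlu))
      · have hvp : v <+: u :=
          List.prefix_of_prefix_length_le (List.prefix_append v _) hu hle
        exact hvu hvp.isInfix
    | none =>
      rw [pvSubAll, hft] at hu
      obtain ⟨d, u', rfl⟩ := List.exists_cons_of_ne_nil hune
      rw [List.cons_prefix_cons] at hu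
      obtain ⟨rfl, hu'⟩ := hu
      have hu's : u' <+: s' := by
        rcases eq_or_ne u' [] with rfl | hne
        · exact List.nil_prefix
        · refine ihn s' (by simp at hs; omega) u' ?_ ?_ hu'
          · intro hinf
            exact hvu (hinf.trans (List.suffix_cons d u').isInfix)
          · right
            obtain ⟨e, u'', rfl⟩ := List.exists_cons_of_ne_nil hne
            have := hlast.resolve_left hune
            rwa [List.getLast?_cons_cons] at this
      exact List.cons_prefix_cons.mpr ⟨rfl, hu's⟩

theorem pvNomatchFold (tbl : List (List Char × List Char))
    (h1 : ∀ p ∈ tbl, p.1 ≠ [] ∧ p.1.getLast? = some '}')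
    (h2 : ∀ p ∈ tbl, '}' ∉ p.2)
    (h3 : ∀ p ∈ tbl, ∀ q ∈ tbl, ¬ p.2 <:+: q.1)
    (c : Char) : ∀ s : List Char, (∀ p ∈ tbl, ¬ p.1 <+: (c :: s)) →
      pvApplyAll tbl (c :: s) = c :: pvApplyAll tbl s := by
  induction tbl with
  | nil => intro s _; rfl
  | cons p tl ih =>
    intro s hnp
    obtain ⟨t, v⟩ := p
    have hft : pvFindTok [(t, v)] (c :: s) = none := by
      rw [pvFindTok_none_iff]
      intro q hq
      simp at hq
      subst hq
      exact hnp (t, v) (by simp)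
    have hstep : pvSubAll [(t, v)] (c :: s) = c :: pvSubAll [(t, v)] s :=
      pvSubAll_cons_none _ _ _ hft
    have htl : ∀ q ∈ tl, ¬ q.1 <+: (c :: pvSubAll [(t, v)] s) := by
      intro q hq hpre
      rw [← hstep] at hpre
      have : q.1 <+: (c :: s) :=
        pvPresSingle t v (h2 (t, v) (by simp)) (c :: s) q.1
          (h3 (t, v) (by simp) q (by simp [hq]))
          (Or.inr (h1 q (by simp [hq])).2) hpre
      exact hnp q (by simp [hq]) this
    show pvApplyAll tl (pvSubAll [(t, v)] (c :: s)) = c :: pvApplyAll tl (pvSubAll [(t, v)] s)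
    rw [hstep]
    exact ih (fun q hq => h1 q (by simp [hq])) (fun q hq => h2 q (by simp [hq]))
      (fun q hq r hr => h3 q (by simp [hq]) r (by simp [hr])) _ htl

theorem pvSkipFold (tbl : List (List Char × List Char)) (v : List Char)
    (hyp : ∀ q ∈ tbl, ∀ j < v.length, ¬ q.1 <+: v.drop j ∧ ¬ v.drop j <+: q.1) :
    ∀ X : List Char, pvApplyAll tbl (v ++ X) = v ++ pvApplyAll tbl X := by
  induction tbl with
  | nil => intro X; rfl
  | cons p tl ih =>
    intro X
    show pvApplyAll tl (pvSubAll [p] (v ++ X)) = v ++ pvApplyAll tl (pvSubAll [p] X)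
    rw [pvSkipSingle p.1 p.2 v (hyp p (by simp)) X]
    exact ih (fun q hq => hyp q (by simp [hq])) _

theorem pvMatchFold : ∀ (tbl : List (List Char × List Char)), pvOK tbl →
    ∀ (t v : List Char), (t, v) ∈ tbl →
    ∀ rest : List Char, pvApplyAll tbl (t ++ rest) = v ++ pvApplyAll tbl rest := by
  intro tbl
  induction tbl with
  | nil => intro _ t v hmem; simp at hmem
  | cons p tl ih =>
    intro hOK t v hmem rest
    obtain ⟨hA, hB, hC, hD, hE, hF⟩ := hOK
    have htne : t ≠ [] := (hA (t, v) hmem).1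
    by_cases hpt : p.1 = t
    · have hpv : p.2 = v := hF p (by simp) (t, v) hmem (by simpa using hpt)
      have hft : pvFindTok [p] (t ++ rest) = some (t, v) := by
        obtain ⟨p1, p2⟩ := p
        simp at hpt hpv
        subst hpt; subst hpv
        simp [pvFindTok, List.isPrefixOf_iff_prefix, List.prefix_append]
      have hstep : pvSubAll [p] (t ++ rest) = v ++ pvSubAll [p] rest := by
        rw [pvSubAll_prefix [p] (t ++ rest) t v hft htne (by simp [htne]),
          List.drop_left]
      show pvApplyAll tl (pvSubAll [p] (t ++ rest)) = v ++ pvApplyAll tl (pvSubAll [p] rest)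
      rw [hstep]
      exact pvSkipFold tl v
        (fun q hq => by
          have := hE q (by simp [hq]) p (by simp)
          rwa [hpv] at this) _
    · have hnov := hD p (by simp) (t, v) hmem hpt
      have hstep : pvSubAll [p] (t ++ rest) = t ++ pvSubAll [p] rest :=
        pvSkipSingle p.1 p.2 t hnov rest
      show pvApplyAll tl (pvSubAll [p] (t ++ rest)) = v ++ pvApplyAll tl (pvSubAll [p] rest)
      rw [hstep]
      have hmem' : (t, v) ∈ tl := by
        rcases List.mem_cons.mp hmem with h | h
        · exact absurd (congrArg Prod.fst h.symm) hpt
        · exact h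
      exact ih ⟨fun q hq => hA q (by simp [hq]), fun q hq => hB q (by simp [hq]),
        fun q hq r hr => hC q (by simp [hq]) r (by simp [hr]),
        fun q hq r hr => hD q (by simp [hq]) r (by simp [hr]),
        fun q hq r hr => hE q (by simp [hq]) r (by simp [hr]),
        fun q hq r hr => hF q (by simp [hq]) r (by simp [hr])⟩ t v hmem' _

theorem pvApplyAll_nil (tbl : List (List Char × List Char)) : pvApplyAll tbl [] = [] := by
  unfold pvApplyAll
  induction tbl with
  | nil => rfl
  | cons p tl ih => simpa [pvSubAll] using ih

theorem pvMain (tbl : List (List Char × List Char)) (hOK : pvOK tbl) :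
    ∀ l : List Char, pvApplyAll tbl l = pvSubAll tbl l := by
  suffices h : ∀ n, ∀ l : List Char, l.length ≤ n → pvApplyAll tbl l = pvSubAll tbl l by
    intro l; exact h l.length l le_rfl
  intro n
  induction n with
  | zero =>
    intro l hl
    have : l = [] := List.eq_nil_of_length_eq_zero (by omega)
    subst this
    rw [pvApplyAll_nil, pvSubAll]
  | succ n ihn =>
    intro l hl
    match l with
    | [] => rw [pvApplyAll_nil, pvSubAll]
    | c :: s =>
      cases hft : pvFindTok tbl (c :: s) with
      | none =>
        have hall := (pvFindTok_none_iff tbl (c :: s)).mp hft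
        rw [pvNomatchFold tbl hOK.1 hOK.2.1 hOK.2.2.1 c s hall,
          ihn s (by simp at hl; omega), pvSubAll_cons_none tbl c s hft]
      | some tv =>
        obtain ⟨t, v⟩ := tv
        obtain ⟨hmem, hpre⟩ := pvFindTok_eq_some tbl (c :: s) t v hft
        obtain ⟨rest, hrest⟩ := hpre
        have htne : t ≠ [] := (hOK.1 (t, v) hmem).1
        rw [← hrest]
        rw [pvMatchFold tbl hOK t v hmem rest]
        rw [pvSubAll_prefix tbl (t ++ rest) t v (by rwa [hrest]) htne (by simp [htne])]
        rw [List.drop_left]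
        congr 1
        have : rest.length ≤ n := by
          have : t.length + rest.length = s.length + 1 := by
            have := congrArg List.length hrest
            simpa using this
          have := List.length_pos_iff.mpr htne
          simp at hl
          omega
        exact ihn rest this

theorem pvB_eq (content : String) :
    process_variables_alt content = String.ofList (pvSubAll pvTbl content.toList) := by
  have h : ((((PySem.Dict.ofList
    [("current_user.full_name", "Sarah Nkosi"),
     ("current_user.role", "CFO"),
     ("get_role_description(current_user.role)", "Chief Financial Officer"),
     ("current_user.role.lower()", "cfo")] : PySem.Dict String String).items.foldl
    (fun m vv => (m.insert ("{{ " ++ vv.1 ++ " }}") vv.2).insert ("{{" ++ vv.1 ++ "}}") vv.2)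
    PySem.Dict.empty).items.map fun kv => (kv.1.toList, kv.2.toList)) = pvTbl) := by decide
  show String.ofList (pvSubAll _ content.toList) = _
  rw [h]

theorem pvA_eq (content : String) :
    process_variables content = String.ofList (pvApplyAll pvTbl content.toList) := by
  have hitems : (PySem.Dict.ofList
    [("current_user.full_name", "Sarah Nkosi"),
     ("current_user.role", "CFO"),
     ("get_role_description(current_user.role)", "Chief Financial Officer"),
     ("current_user.role.lower()", "cfo")] : PySem.Dict String String).items =
    [("current_user.full_name", "Sarah Nkosi"),
     ("current_user.role", "CFO"),
     ("get_role_description(current_user.role)", "Chief Financial Officer"),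
     ("current_user.role.lower()", "cfo")] := by decide
  have e1 : ("{{ " ++ "current_user.full_name" ++ " }}") = "{{ current_user.full_name }}" := by decide
  have e2 : ("{{" ++ "current_user.full_name" ++ "}}") = "{{current_user.full_name}}" := by decide
  have e3 : ("{{ " ++ "current_user.role" ++ " }}") = "{{ current_user.role }}" := by decide
  have e4 : ("{{" ++ "current_user.role" ++ "}}") = "{{current_user.role}}" := by decide
  have e5 : ("{{ " ++ "get_role_description(current_user.role)" ++ " }}") = "{{ get_role_description(current_user.role) }}" := by decide
  have e6 : ("{{" ++ "get_role_description(current_user.role)" ++ "}}") = "{{get_role_description(current_user.role)}}" := by decide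
  have e7 : ("{{ " ++ "current_user.role.lower()" ++ " }}") = "{{ current_user.role.lower() }}" := by decide
  have e8 : ("{{" ++ "current_user.role.lower()" ++ "}}") = "{{current_user.role.lower()}}" := by decide
  simp only [process_variables]
  rw [hitems]
  simp only [List.foldl_cons, List.foldl_nil]
  rw [e1, e2, e3, e4, e5, e6, e7, e8]
  simp only [PySem.Str.replace, String.toList_ofList]
  simp only [pvApplyAll, pvTbl, List.foldl_cons, List.foldl_nil]
  rw [pvReplace_eq_subAll _ _ _ (by decide), pvReplace_eq_subAll _ _ _ (by decide),
      pvReplace_eq_subAll _ _ _ (by decide), pvReplace_eq_subAll _ _ _ (by decide),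
      pvReplace_eq_subAll _ _ _ (by decide), pvReplace_eq_subAll _ _ _ (by decide),
      pvReplace_eq_subAll _ _ _ (by decide), pvReplace_eq_subAll _ _ _ (by decide)]

-- ===== VERDICT (by name: the statement is the Claim_ definition above) =====
theorem process_variables_spec : Claim_equal_process_variables := by
  intro content _
  unfold Spec_process_variables
  rw [pvA_eq, pvB_eq, pvMain pvTbl pvOK_pvTbl]
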